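-- pv_equiv track=rewrite | github.com/j4ngzzz/Nightjar | src/nightjar/dafny_pro.py | _add_general_hint
-- ===== SOURCE A (Python) =====
-- def _add_general_hint(dfy_code: str, errors: list[dict]) -> str:
--     """Add a general proof hint when no specific line is identified."""
--     # Find the first 'return' statement or closing brace and hint before it
--     lines = dfy_code.splitlines(keepends=True)
--     result_lines: list[str] = []
--     hint_added = False
--     for line in reversed(lines):
--         stripped = line.strip()
--         if not hint_added and (stripped.startswith("return") or stripped == "}"):
--             indent = len(line) - len(line.lstrip())
--             hint = " " * indent + "assert true; // proof hint: verify state before return\n"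
--             result_lines.insert(0, line)
--             result_lines.insert(0, hint)
--             hint_added = True
--         else:
--             result_lines.insert(0, line)
--     return "".join(result_lines)
-- ===== SOURCE B (Python) =====
-- def _add_general_hint(dfy_code: str, errors: list[dict]) -> str:
--     """Add a general proof hint when no specific line is identified."""
--     lines = dfy_code.splitlines(keepends=True)
--     idx = -1
--     for i, line in enumerate(lines):
--         s = line.strip()
--         if s.startswith("return") or s == "}":
--             idx = i
--     if idx < 0:
--         return dfy_code
--     target = lines[idx]
--     indent = len(target) - len(target.lstrip())
--     hint = " " * indent + "assert true; // proof hint: verify state before return\n"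
--     return "".join(lines[:idx] + [hint, target] + lines[idx + 1:])
-- ===== Notes on version B (the rewrite author's own statement) =====
-- stated objective: simpler
-- what changed: A builds the result by traversing the lines in reverse with repeated insert(0) and a hint_added flag; B makes one forward pass to find the index of the last return/'}' line, returns the input unchanged if none, and otherwise splices the hint in with list slicing and a single join.
import Mathlib
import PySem

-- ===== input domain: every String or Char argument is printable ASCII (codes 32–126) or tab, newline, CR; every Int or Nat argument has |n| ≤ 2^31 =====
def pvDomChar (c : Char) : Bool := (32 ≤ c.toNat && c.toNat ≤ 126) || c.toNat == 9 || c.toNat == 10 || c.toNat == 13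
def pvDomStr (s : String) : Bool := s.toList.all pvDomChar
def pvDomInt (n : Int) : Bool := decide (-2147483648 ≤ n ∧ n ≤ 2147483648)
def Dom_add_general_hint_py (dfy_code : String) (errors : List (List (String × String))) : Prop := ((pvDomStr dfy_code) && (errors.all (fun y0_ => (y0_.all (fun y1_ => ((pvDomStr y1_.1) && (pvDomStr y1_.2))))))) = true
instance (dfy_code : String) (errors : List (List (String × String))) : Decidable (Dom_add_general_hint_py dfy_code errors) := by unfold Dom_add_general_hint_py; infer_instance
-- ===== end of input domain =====

-- B replaces A's reversed traverse-with-insert(0) build by a forward find-last-index pass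
-- plus a single splice/join (simpler decomposition; returns the input unchanged when no
-- target line exists). Equivalent on every input; `errors` is unused by both.

-- str.splitlines(keepends=True), ported by hand (PySem.Chars.splitlines drops the ends).
-- Exact on the Dom character set: the only line boundaries there are '\n', '\r\n', '\r'.
def pvSplitlinesKeep : List Char → List Char → List (List Char)
  | [], acc => if acc = [] then [] else [acc.reverse]
  | '\n' :: t, acc => (acc.reverse ++ ['\n']) :: pvSplitlinesKeep t []
  | '\r' :: '\n' :: t, acc => (acc.reverse ++ ['\r', '\n']) :: pvSplitlinesKeep t []
  | '\r' :: t, acc => (acc.reverse ++ ['\r']) :: pvSplitlinesKeep t []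
  | c :: t, acc => pvSplitlinesKeep t (c :: acc)

def pvHintText : List Char := "assert true; // proof hint: verify state before return\n".toList

-- ===== PORT A =====
-- for line in reversed(lines): … result_lines.insert(0, …)  — state (result_lines, hint_added)
def add_general_hint_py (dfy_code : String) (errors : List (List (String × String))) : String :=
  let lines := pvSplitlinesKeep dfy_code.toList []
  let st := lines.reverse.foldl
    (fun (st : List (List Char) × Bool) line =>
      let stripped := PySem.Chars.strip line
      if !st.2 && (PySem.Chars.startswith stripped "return".toList || stripped == ['}']) then
        let indent := line.length - (PySem.Chars.lstrip line).length
        let hint := List.replicate indent ' ' ++ pvHintText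
        (hint :: line :: st.1, true)   -- the two insert(0, …) calls
      else
        (line :: st.1, st.2))
    ([], false)
  String.ofList st.1.flatten           -- "".join(result_lines)

-- ===== PORT B =====
def pvIsTarget (line : List Char) : Bool :=
  let s := PySem.Chars.strip line
  PySem.Chars.startswith s "return".toList || s == ['}']

def add_general_hint_py_alt (dfy_code : String) (errors : List (List (String × String))) : String :=
  let lines := pvSplitlinesKeep dfy_code.toList []
  -- for i, line in enumerate(lines): if …: idx = i
  let idx := (PySem.List.enumerate lines).foldl
    (fun (acc : Int) p => if pvIsTarget p.2 then p.1 else acc) (-1)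
  if idx < 0 then dfy_code
  else
    let target := PySem.List.pyGetD lines idx []
    let indent := target.length - (PySem.Chars.lstrip target).length
    let hint := List.replicate indent ' ' ++ pvHintText
    -- "".join(lines[:idx] + [hint, target] + lines[idx+1:])
    String.ofList (PySem.List.slice lines none (some idx)
      ++ hint :: target :: PySem.List.slice lines (some (idx + 1)) none).flatten

-- ===== PRECONDITION & SPEC =====
def Spec_add_general_hint_py (dfy_code : String) (errors : List (List (String × String))) (out : String) : Prop := out = add_general_hint_py_alt dfy_code errors
instance (dfy_code : String) (errors : List (List (String × String))) (out : String) : Decidable (Spec_add_general_hint_py dfy_code errors out) := by unfold Spec_add_general_hint_py; infer_instance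

-- ===== CLAIM (what is proved, stated in full; the proofs are below) =====
def Claim_equal_add_general_hint_py : Prop := ∀ (dfy_code : String) (errors : List (List (String × String))), Dom_add_general_hint_py dfy_code errors → Spec_add_general_hint_py dfy_code errors (add_general_hint_py dfy_code errors)

-- ===== LEMMAS AND PROOFS =====

-- splitting with kept ends loses nothing: joining gives back the input
theorem pvSplitlinesKeep_flatten (cs acc : List Char) :
    (pvSplitlinesKeep cs acc).flatten = acc.reverse ++ cs := by
  induction cs, acc using pvSplitlinesKeep.induct
  all_goals rw [pvSplitlinesKeep]
  all_goals try split_ifs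
  all_goals simp_all [List.append_assoc]

-- the hint line both programs build for a given target line
def pvHintFor (line : List Char) : List Char :=
  List.replicate (line.length - (PySem.Chars.lstrip line).length) ' ' ++ pvHintText

-- index of the LAST target line, as a structural recursion
def pvLastIdx : List (List Char) → Option Nat
  | [] => none
  | x :: xs =>
      match pvLastIdx xs with
      | some j => some (j + 1)
      | none => if pvIsTarget x then some 0 else none

-- A's reversed-traversal loop, characterised by pvLastIdx
theorem pvA_loop_eq (lines : List (List Char)) :
    List.foldl
      (fun (st : List (List Char) × Bool) line =>
        let stripped := PySem.Chars.strip line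
        if !st.2 && (PySem.Chars.startswith stripped "return".toList || stripped == ['}']) then
          let indent := line.length - (PySem.Chars.lstrip line).length
          let hint := List.replicate indent ' ' ++ pvHintText
          (hint :: line :: st.1, true)
        else
          (line :: st.1, st.2))
      ([], false) lines.reverse
    = match pvLastIdx lines with
      | none => (lines, false)
      | some i => (lines.take i ++ pvHintFor (lines.getD i []) :: lines.getD i [] :: lines.drop (i + 1), true) := by
  rw [List.foldl_reverse]
  induction lines with
  | nil => simp [pvLastIdx]
  | cons x xs ih =>
      simp only [List.foldr_cons, ih]
      cases h : pvLastIdx xs with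
      | none =>
          simp only [pvLastIdx, h]
          by_cases hx : pvIsTarget x
          · have hx' := hx
            simp only [pvIsTarget] at hx'
            simp [hx, pvHintFor]
            intro hA
            simp only [Bool.or_eq_true] at hx'
            rcases hx' with h1 | h1 <;> simp_all
          · have hxf : pvIsTarget x = false := by simpa using hx
            have hx' := hxf
            simp only [pvIsTarget, Bool.or_eq_false_iff] at hx'
            simp [hxf]
            simp_all
      | some j =>
          simp [pvLastIdx, h, pvHintFor, List.take_succ_cons, List.drop_succ_cons]

-- B's overwrite loop over enumerate computes pvLastIdx (shifted by the start index)
theorem pvB_loop_eq (lines : List (List Char)) (k acc : Int) :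
    (PySem.List.enumerate lines k).foldl
      (fun (a : Int) p => if pvIsTarget p.2 then p.1 else a) acc
    = match pvLastIdx lines with
      | none => acc
      | some j => k + j := by
  induction lines generalizing k acc with
  | nil => simp [PySem.List.enumerate_nil, pvLastIdx]
  | cons x xs ih =>
      rw [PySem.List.enumerate_cons]
      simp only [List.foldl_cons, ih]
      cases h : pvLastIdx xs with
      | none =>
          simp only [pvLastIdx, h]
          by_cases hx : pvIsTarget x <;> simp [hx]
      | some j =>
          simp only [pvLastIdx, h]
          push_cast
          try ring

theorem pvLastIdx_lt_length (lines : List (List Char)) (i : Nat)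
    (h : pvLastIdx lines = some i) : i < lines.length := by
  induction lines generalizing i with
  | nil => simp [pvLastIdx] at h
  | cons x xs ih =>
      simp only [pvLastIdx] at h
      cases hxs : pvLastIdx xs with
      | none =>
          rw [hxs] at h
          split_ifs at h with hx
          injection h with h2
          simp [← h2]
      | some j =>
          rw [hxs] at h
          simp only [Option.some.injEq] at h
          have := ih j hxs
          simp only [List.length_cons]
          omega

-- ===== VERDICT (by name: the statement is the Claim_ definition above) =====
theorem add_general_hint_py_spec : Claim_equal_add_general_hint_py := by
  intro dfy_code errors _
  unfold Spec_add_general_hint_py add_general_hint_py add_general_hint_py_alt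
  cases h : pvLastIdx (pvSplitlinesKeep dfy_code.toList []) with
  | none =>
      simp only [pvA_loop_eq, pvB_loop_eq, h]
      rw [if_pos (by norm_num)]
      rw [pvSplitlinesKeep_flatten]
      simp [String.ofList_toList]
  | some i =>
      have hi := pvLastIdx_lt_length _ _ h
      simp only [pvA_loop_eq, pvB_loop_eq, h]
      rw [if_neg (by simp)]
      have hc : ((0 : Int) + (i : Nat)) = ((i : Nat) : Int) := by omega
      rw [hc, PySem.List.pyGetD_natCast,
        PySem.List.slice_to _ (by omega : (0:Int) ≤ ((i : Nat) : Int))]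
      have h1 : ((i : Nat) : Int) + 1 = ((i + 1 : Nat) : Int) := by omega
      rw [h1, PySem.List.slice_from _ (by omega : (0:Int) ≤ ((i + 1 : Nat) : Int))]
      simp [pvHintFor]
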